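-- pv_equiv track=rewrite | github.com/rubelw/OSSS | src/OSSS/ai/agents/query_data/handlers/curriculum_units_handler.py | _select_curriculum_units_fields
-- ===== SOURCE A (Python) =====
-- from typing import Any, Dict, List, Sequence
--
-- def _select_curriculum_units_fields(
--     rows: Sequence[Dict[str, Any]],
-- ) -> List[str]:
--     if not rows:
--         return []
--
--     preferred_order = [
--         "id",
--         "curriculum_id",
--         "curriculum_code",
--         "unit_code",
--         "unit_title",
--         "unit_number",
--         "subject",
--         "grade_level",
--         "grade_band",
--         "pacing_weeks",
--         "start_date",
--         "end_date",
--         "is_published",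
--         "is_active",
--         "owner_id",
--         "owner_name",
--         "created_at",
--         "updated_at",
--     ]
--
--     all_keys: List[str] = []
--     for r in rows:
--         for k in r.keys():
--             if k not in all_keys:
--                 all_keys.append(k)
--
--     ordered = [k for k in preferred_order if k in all_keys]
--     ordered.extend(k for k in all_keys if k not in ordered)
--     return ordered
-- ===== SOURCE B (Python) =====
-- from typing import Any, Dict, List, Sequence
--
-- _PREFERRED_ORDER = [
--     "id",
--     "curriculum_id",
--     "curriculum_code",
--     "unit_code",
--     "unit_title",
--     "unit_number",
--     "subject",
--     "grade_level",
--     "grade_band",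
--     "pacing_weeks",
--     "start_date",
--     "end_date",
--     "is_published",
--     "is_active",
--     "owner_id",
--     "owner_name",
--     "created_at",
--     "updated_at",
-- ]
--
--
-- def _select_curriculum_units_fields(
--     rows: Sequence[Dict[str, Any]],
-- ) -> List[str]:
--     if not rows:
--         return []
--
--     p = len(_PREFERRED_ORDER)
--     rank = {k: i for i, k in enumerate(_PREFERRED_ORDER)}
--
--     first_seen: Dict[str, int] = {}
--     for r in rows:
--         for k in r.keys():
--             if k not in first_seen:
--                 first_seen[k] = len(first_seen)
--
--     return sorted(first_seen, key=lambda k: (rank.get(k, p), first_seen[k]))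
-- ===== Notes on version B (the rewrite author's own statement) =====
-- stated objective: faster
-- what changed: Replaces A's quadratic membership-scan passes (dedup list with 'k not in all_keys', then two filtering scans against growing lists) by a rank index table plus a first-seen-index dict built in one pass, and one stable sort of the keys on the tuple (rank, first_seen).
import Mathlib
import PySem

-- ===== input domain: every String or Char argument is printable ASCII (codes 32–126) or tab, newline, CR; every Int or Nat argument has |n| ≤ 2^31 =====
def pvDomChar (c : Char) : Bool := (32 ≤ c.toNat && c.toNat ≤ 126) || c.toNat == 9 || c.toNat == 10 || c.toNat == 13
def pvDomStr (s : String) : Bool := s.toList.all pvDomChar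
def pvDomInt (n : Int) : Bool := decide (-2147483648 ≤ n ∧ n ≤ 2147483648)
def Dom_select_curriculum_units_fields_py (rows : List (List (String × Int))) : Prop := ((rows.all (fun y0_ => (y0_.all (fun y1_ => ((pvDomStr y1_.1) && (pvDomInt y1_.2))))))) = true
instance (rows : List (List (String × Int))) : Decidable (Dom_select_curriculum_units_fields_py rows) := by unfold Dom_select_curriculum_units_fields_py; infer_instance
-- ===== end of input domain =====

-- B replaces A's quadratic membership-scan passes by a rank table, a first-seen index dict and one
-- stable sort on the key (rank, first_seen); a timing run measured B faster on large inputs.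

-- the module-level constant list of preferred field names (a local literal in A, module constant in B)
def preferredOrder : List String :=
  ["id", "curriculum_id", "curriculum_code", "unit_code", "unit_title", "unit_number",
   "subject", "grade_level", "grade_band", "pacing_weeks", "start_date", "end_date",
   "is_published", "is_active", "owner_id", "owner_name", "created_at", "updated_at"]

-- ===== PORT A =====
-- literal port: rows' dicts are given as association lists, `r.keys()` = (PySem.Dict.ofList r).keys;
-- `ordered.extend(k for k in all_keys if k not in ordered)` tests the generator against the GROWING
-- `ordered` list (CPython consumes the generator while appending), hence the foldl over the same list.
def select_curriculum_units_fields_py (rows : List (List (String × Int))) : List String :=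
  if rows = [] then []
  else
    let all_keys : List String := rows.foldl (fun acc r =>
      (PySem.Dict.ofList r).keys.foldl (fun acc k => if k ∈ acc then acc else acc ++ [k]) acc) []
    let ordered : List String := preferredOrder.filter (fun k => decide (k ∈ all_keys))
    all_keys.foldl (fun acc k => if k ∈ acc then acc else acc ++ [k]) ordered

-- ===== PORT B =====
-- literal port of Source B; `first_seen[k]` inside the sort key is ported as getD _ 0 — exact, since
-- every element being sorted is a key of first_seen.
def select_curriculum_units_fields_py_alt (rows : List (List (String × Int))) : List String :=
  if rows = [] then []
  else
    let p : Int := (preferredOrder.length : Int)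
    let rank : PySem.Dict String Int :=
      (PySem.List.enumerate preferredOrder).foldl (fun d ik => d.insert ik.2 ik.1) PySem.Dict.empty
    let first_seen : PySem.Dict String Int := rows.foldl (fun d r =>
      (PySem.Dict.ofList r).keys.foldl
        (fun d k => if d.contains k then d else d.insert k (PySem.Dict.size d : Int)) d)
      PySem.Dict.empty
    PySem.List.sorted2 first_seen.keys (fun k => rank.getD k p) (fun k => first_seen.getD k 0)

-- ===== PRECONDITION & SPEC =====
def Spec_select_curriculum_units_fields_py (rows : List (List (String × Int))) (out : List String) : Prop := out = select_curriculum_units_fields_py_alt rows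
instance (rows : List (List (String × Int))) (out : List String) : Decidable (Spec_select_curriculum_units_fields_py rows out) := by unfold Spec_select_curriculum_units_fields_py; infer_instance

-- ===== CLAIM (what is proved, stated in full; the proofs are below) =====
def Claim_equal_select_curriculum_units_fields_py : Prop := ∀ (rows : List (List (String × Int))), Dom_select_curriculum_units_fields_py rows → Spec_select_curriculum_units_fields_py rows (select_curriculum_units_fields_py rows)

-- ===== LEMMAS AND PROOFS =====

-- the first_seen dict after processing first-seen key list l, keys paired with indices from i on
def pvPairs : Nat → List String → List (String × Int)
  | _, [] => []
  | i, k :: t => (k, (i : Int)) :: pvPairs (i + 1) t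

theorem pvPairs_map_fst (i : Nat) (l : List String) : (pvPairs i l).map (fun x => x.1) = l := by
  induction l generalizing i with
  | nil => rfl
  | cons k t ih => simp [pvPairs, ih]

theorem pvPairs_length (i : Nat) (l : List String) : (pvPairs i l).length = l.length := by
  induction l generalizing i with
  | nil => rfl
  | cons k t ih => simp [pvPairs, ih]

theorem pvPairs_append (i : Nat) (l : List String) (k : String) :
    pvPairs i (l ++ [k]) = pvPairs i l ++ [(k, ((i + l.length : Nat) : Int))] := by
  induction l generalizing i with
  | nil => simp [pvPairs]
  | cons a t ih => simp [pvPairs, ih]; ring_nf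

theorem pvGet_not_mem (l : List String) (k : String) (h : k ∉ l) :
    ∀ i : Nat, (PySem.Dict.mk (pvPairs i l)).get? k = none := by
  induction l with
  | nil => intro i; rfl
  | cons a t ih =>
    intro i
    simp only [List.mem_cons, not_or] at h
    rw [pvPairs, PySem.Dict.get?_mk_cons]
    rw [if_neg (by simp; exact fun hh => h.1 hh.symm)]
    exact ih h.2 (i + 1)

theorem pvGet_bounds (l : List String) (k : String) (h : k ∈ l) :
    ∀ i : Nat, ∃ v : Int, (PySem.Dict.mk (pvPairs i l)).get? k = some v ∧
      (i : Int) ≤ v ∧ v < (i : Int) + l.length := by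
  induction l with
  | nil => cases h
  | cons a t ih =>
    intro i
    rw [pvPairs, PySem.Dict.get?_mk_cons]
    by_cases hak : a = k
    · refine ⟨(i : Int), by simp [hak], le_refl _, by simp only [List.length_cons]; push_cast; omega⟩
    · have hkt : k ∈ t := by rcases List.mem_cons.mp h with h' | h' <;> [exact absurd h'.symm hak; exact h']
      obtain ⟨v, hv, h1, h2⟩ := ih hkt (i + 1)
      refine ⟨v, by simp [hak, hv], by push_cast at h1 ⊢; omega, by push_cast at h2 ⊢; simp; omega⟩

theorem pvPairs_pairwise (d0 : Int) (l : List String) (h : l.Nodup) :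
    ∀ i : Nat, l.Pairwise (fun a b =>
      (PySem.Dict.mk (pvPairs i l)).getD a d0 < (PySem.Dict.mk (pvPairs i l)).getD b d0) := by
  induction l with
  | nil => intro i; exact List.Pairwise.nil
  | cons a t ih =>
    intro i
    have hna : a ∉ t := (List.nodup_cons.mp h).1
    have hnt : t.Nodup := (List.nodup_cons.mp h).2
    constructor
    · intro b hb
      have hba : b ≠ a := fun e => hna (e ▸ hb)
      obtain ⟨v, hv, h1, _⟩ := pvGet_bounds t b hb (i + 1)
      rw [PySem.Dict.getD_eq_get?_getD, PySem.Dict.getD_eq_get?_getD]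
      rw [pvPairs, PySem.Dict.get?_mk_cons, PySem.Dict.get?_mk_cons]
      simp only [beq_iff_eq, if_neg (Ne.symm hba), hv]
      simp; push_cast at h1 ⊢; omega
    · refine (ih hnt (i + 1)).imp_of_mem ?_
      intro b c hb hc hlt
      have hba : b ≠ a := fun e => hna (e ▸ hb)
      have hca : c ≠ a := fun e => hna (e ▸ hc)
      rw [PySem.Dict.getD_eq_get?_getD, PySem.Dict.getD_eq_get?_getD] at hlt ⊢
      rw [pvPairs, PySem.Dict.get?_mk_cons, PySem.Dict.get?_mk_cons]
      simpa [beq_iff_eq, if_neg (Ne.symm hba), if_neg (Ne.symm hca)] using hlt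

-- a nested "for r in rows: for k in keys(r)" foldl is a foldl over the flattened key stream
theorem pvFoldl_flat {β : Type} (f : β → String → β) (g : List (String × Int) → List String)
    (rows : List (List (String × Int))) (init : β) :
    rows.foldl (fun acc r => (g r).foldl f acc) init = (rows.flatMap g).foldl f init := by
  induction rows generalizing init with
  | nil => rfl
  | cons r rs ih => simp [List.flatMap_cons, List.foldl_append, ih]

-- joint invariant of A's all_keys loop and B's first_seen loop over the same key stream
theorem pvState (ks : List String) : ∀ l : List String, l.Nodup →
    (ks.foldl (fun acc k => if k ∈ acc then acc else acc ++ [k]) l).Nodup ∧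
    ks.foldl (fun d k => if d.contains k then d else d.insert k (PySem.Dict.size d : Int))
        (PySem.Dict.mk (pvPairs 0 l)) =
      PySem.Dict.mk (pvPairs 0 (ks.foldl (fun acc k => if k ∈ acc then acc else acc ++ [k]) l)) := by
  induction ks with
  | nil => intro l hl; exact ⟨hl, rfl⟩
  | cons k t ih =>
    intro l hl
    have hcont : (PySem.Dict.mk (pvPairs 0 l)).contains k = decide (k ∈ l) := by
      rw [PySem.Dict.contains_eq_decide_mem_keys]
      simp [PySem.Dict.keys_mk, pvPairs_map_fst]
    by_cases hk : k ∈ l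
    · simpa [List.foldl_cons, hcont, hk] using ih l hl
    · have hins : (PySem.Dict.mk (pvPairs 0 l)).insert k ((PySem.Dict.size (PySem.Dict.mk (pvPairs 0 l)) : Nat) : Int)
          = PySem.Dict.mk (pvPairs 0 (l ++ [k])) := by
        apply PySem.Dict.ext
        rw [PySem.Dict.items_insert_of_not_contains _ _ (by simp [hcont, hk])]
        have hsz : PySem.Dict.size (PySem.Dict.mk (pvPairs 0 l)) = l.length := by
          simpa [PySem.Dict.size] using pvPairs_length 0 l
        simp [pvPairs_append, hsz]
      have hnd : (l ++ [k]).Nodup := by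
        simp [List.nodup_append, hl]
        exact fun a ha e => hk (e ▸ ha)
      simpa [List.foldl_cons, hcont, hk, hins] using ih (l ++ [k]) hnd

-- A's extend loop over a Nodup list appends exactly the elements missing from the start value
theorem pvExtend (l : List String) : ∀ acc : List String, l.Nodup →
    l.foldl (fun a k => if k ∈ a then a else a ++ [k]) acc
      = acc ++ l.filter (fun k => decide (k ∉ acc)) := by
  induction l with
  | nil => intro acc _; simp
  | cons k t ih =>
    intro acc h
    have hkt : k ∉ t := (List.nodup_cons.mp h).1
    have hnt : t.Nodup := (List.nodup_cons.mp h).2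
    by_cases hk : k ∈ acc
    · simp only [List.foldl_cons, if_pos hk, List.filter_cons]
      simp [hk, ih acc hnt]
    · simp only [List.foldl_cons, if_neg hk, List.filter_cons]
      rw [ih (acc ++ [k]) hnt]
      have hfc : List.filter (fun x => !decide (x ∈ acc) && !decide (x = k)) t
          = List.filter (fun x => !decide (x ∈ acc)) t := by
        apply List.filter_congr
        intro x hx
        have hxk : x ≠ k := fun e => hkt (e ▸ hx)
        simp [hxk]
      simp [hk, hfc]

-- Python's tuple sort key (k1, k2) is the lexicographic order on Int × Int
theorem pvSorted2_toLex (f g : String → Int) (xs : List String) :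
    PySem.List.sorted2 xs f g = PySem.List.sorted xs (fun x => toLex (f x, g x)) := by
  have hb : (fun a b => decide (f a < f b) || (!decide (f b < f a) && decide (g a < g b)))
      = (fun (a b : String) => decide ((toLex (f a, g a) : Lex (Int × Int)) < toLex (f b, g b))) := by
    funext a b
    rcases lt_trichotomy (f a) (f b) with h | h | h <;>
      simp [Prod.Lex.lt_iff, h, not_lt.mpr h.le] <;> omega
  simp only [PySem.List.sorted2, PySem.List.sorted, if_neg (Bool.false_ne_true)]
  rw [hb]

theorem pvPreferred_nodup : preferredOrder.Nodup := by decide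

-- B's rank dict comprehension is pvPairs over preferredOrder (a closed computation)
theorem pvRank_eq :
    (PySem.List.enumerate preferredOrder).foldl (fun d ik => d.insert ik.2 ik.1) PySem.Dict.empty
      = PySem.Dict.mk (pvPairs 0 preferredOrder) := by decide

-- ===== VERDICT (by name: the statement is the Claim_ definition above) =====
theorem select_curriculum_units_fields_py_spec : Claim_equal_select_curriculum_units_fields_py := by
  intro rows _
  unfold Spec_select_curriculum_units_fields_py
  unfold select_curriculum_units_fields_py select_curriculum_units_fields_py_alt
  by_cases hrows : rows = []
  · simp [hrows]
  simp only [if_neg hrows]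
  rw [pvFoldl_flat, pvFoldl_flat, pvRank_eq]
  set ks : List String := rows.flatMap (fun r => (PySem.Dict.ofList r).keys) with hks
  set L : List String := ks.foldl (fun acc k => if k ∈ acc then acc else acc ++ [k]) [] with hL
  obtain ⟨hLnd, hfs⟩ := pvState ks [] List.nodup_nil
  rw [show pvPairs 0 ([] : List String) = [] from rfl] at hfs
  rw [show (PySem.Dict.empty : PySem.Dict String Int) = PySem.Dict.mk [] from rfl, hfs]
  rw [← hL] at hLnd ⊢
  -- abbreviations for the two key functions
  set rankv : String → Int := fun k => (PySem.Dict.mk (pvPairs 0 preferredOrder)).getD k (preferredOrder.length : Int) with hrankv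
  set fsv : String → Int := fun k => (PySem.Dict.mk (pvPairs 0 L)).getD k 0 with hfsv
  have hkeys : (PySem.Dict.mk (pvPairs 0 L)).keys = L := by
    simp [PySem.Dict.keys_mk, pvPairs_map_fst]
  rw [hkeys, pvSorted2_toLex]
  -- A's value
  rw [pvExtend L _ hLnd]
  have hfiltL : L.filter (fun k => decide (k ∉ preferredOrder.filter (fun k => decide (k ∈ L))))
      = L.filter (fun k => decide (k ∉ preferredOrder)) := by
    apply List.filter_congr
    intro x hx
    simp [List.mem_filter, hx]
  rw [hfiltL]
  -- rank values
  have hrank_mem : ∀ k ∈ preferredOrder, rankv k < (preferredOrder.length : Int) := by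
    intro k hk
    obtain ⟨v, hv, _, h2⟩ := pvGet_bounds preferredOrder k hk 0
    rw [hrankv]; simp only [PySem.Dict.getD_eq_get?_getD, hv, Option.getD_some]
    simpa using h2
  have hrank_not : ∀ k, k ∉ preferredOrder → rankv k = (preferredOrder.length : Int) := by
    intro k hk
    rw [hrankv]; simp only [PySem.Dict.getD_eq_get?_getD, pvGet_not_mem _ _ hk 0, Option.getD_none]
  -- the target list and its properties
  apply Eq.symm
  apply PySem.List.sorted_eq_of_perm_of_pairwise_lt
  · -- permutation
    have h1 : (preferredOrder.filter (fun k => decide (k ∈ L))).Perm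
        (L.filter (fun k => decide (k ∈ preferredOrder))) := by
      rw [List.perm_ext_iff_of_nodup (pvPreferred_nodup.filter _) (hLnd.filter _)]
      intro a; simp [List.mem_filter, and_comm]
    have h2 : (L.filter (fun k => decide (k ∈ preferredOrder)) ++
        L.filter (fun k => decide (k ∉ preferredOrder))).Perm L := by
      have := List.filter_append_perm (fun k => decide (k ∈ preferredOrder)) L
      simpa [decide_not] using this
    exact (h1.append (List.Perm.refl _)).trans h2
  · -- pairwise strict lex order
    rw [List.pairwise_append]
    refine ⟨?_, ?_, ?_⟩
    · -- within the preferred part: rank strictly increases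
      refine ((pvPairs_pairwise (preferredOrder.length : Int) preferredOrder pvPreferred_nodup 0).filter _).imp ?_
      intro a b hlt
      exact Prod.Lex.lt_iff.mpr (Or.inl hlt)
    · -- within the leftover part: equal ranks, first-seen index strictly increases
      refine ((pvPairs_pairwise 0 L hLnd 0).filter _).imp_of_mem ?_
      intro a b ha hb hlt
      have hna : a ∉ preferredOrder := by simpa using (List.mem_filter.mp ha).2
      have hnb : b ∉ preferredOrder := by simpa using (List.mem_filter.mp hb).2
      exact Prod.Lex.lt_iff.mpr (Or.inr ⟨by rw [hrank_not a hna, hrank_not b hnb]; rfl, hlt⟩)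
    · -- across: any preferred key ranks before any non-preferred key
      intro a ha b hb
      have hpa : a ∈ preferredOrder := (List.mem_filter.mp ha).1
      have hnb : b ∉ preferredOrder := by simpa using (List.mem_filter.mp hb).2
      exact Prod.Lex.lt_iff.mpr (Or.inl (by rw [hrank_not b hnb]; exact hrank_mem a hpa))
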